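-- pv_equiv track=rewrite | github.com/danielgomez2501/ICCH | Funciones.py | TraducirSelecion
-- ===== SOURCE A (Python) =====
-- def TraducirSelecion(lista):
--     """
--     Crear diccionario con las caraceristicas por canal
--
--     Parameters
--     ----------
--     lista : TYPE
--         DESCRIPTION.
--
--     Returns
--     -------
--     carac_sel : TYPE
--         DESCRIPTION.
--
--     """
--     carac_sel = dict()
--     for i in range(len(lista)):
--         canal, carac = lista[i].split(": ")
--         if canal in carac_sel:
--             	carac_sel[canal].append(carac)
--         else:
--             	carac_sel[canal] = [carac]
--
--     return carac_sel
-- ===== SOURCE B (Python) =====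
-- def TraducirSelecion(lista):
--     # Alternative decomposition: parse all pairs once, take channels in first-
--     # appearance order, then build each channel's feature list by one filter pass.
--     pairs = []
--     for elem in lista:
--         canal, carac = elem.split(": ")
--         pairs.append((canal, carac))
--     canales = list(dict.fromkeys(canal for canal, _ in pairs))
--     return {c: [carac for canal, carac in pairs if canal == c] for c in canales}
-- ===== Notes on version B (the rewrite author's own statement) =====
-- stated objective: alternative
-- what changed: Replaces the incremental dict-accumulation (membership test + append per element) with parse-once, ordered-dedup of channels, then one filter comprehension per channel.
import Mathlib
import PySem

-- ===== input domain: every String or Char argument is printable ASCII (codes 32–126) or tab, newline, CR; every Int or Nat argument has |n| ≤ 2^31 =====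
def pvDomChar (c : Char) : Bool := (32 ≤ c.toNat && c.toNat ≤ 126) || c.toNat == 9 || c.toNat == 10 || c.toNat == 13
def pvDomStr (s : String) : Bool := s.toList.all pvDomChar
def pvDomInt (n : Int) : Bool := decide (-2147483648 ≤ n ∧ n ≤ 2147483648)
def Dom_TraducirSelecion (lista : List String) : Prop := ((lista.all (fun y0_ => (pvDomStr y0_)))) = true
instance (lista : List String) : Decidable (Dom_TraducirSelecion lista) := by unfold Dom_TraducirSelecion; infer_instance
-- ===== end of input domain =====

-- B groups the parsed (channel, feature) pairs by taking the channels in first-appearance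
-- order and one filter pass per channel, instead of A's incremental dict accumulation.

-- ===== PORT A =====
-- shared helper: s.split(": ") (sep is non-empty, so Python's split never raises here)
def pvSplit (s : String) : List String := (PySem.Str.split? s ": ").getD []

def TraducirSelecion (lista : List String) : List (String × List String) :=
  ((PySem.List.pyRange 0 (PySem.List.len lista)).foldl (fun d j =>
      match pvSplit (PySem.List.pyGetD lista j "") with
      | [canal, carac] =>
        match PySem.Dict.get? d canal with
        | some fs => PySem.Dict.insert d canal (fs ++ [carac])
        | none => PySem.Dict.insert d canal [carac]
      | _ => d   -- unreachable inside Pre_: Python raises ValueError on the unpacking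
      ) (PySem.Dict.mk [])).items

-- ===== PORT B =====
-- the two-name unpacking 'canal, carac = ...': first and second piece (Pre_ makes
-- the split have exactly two pieces; Python raises ValueError otherwise)
def pvParse (s : String) : String × String :=
  let l := (PySem.Str.split? s ": ").getD []
  (l.headD "", (l.drop 1).headD "")

def TraducirSelecion_alt (lista : List String) : List (String × List String) :=
  let pairs := lista.map pvParse
  let canales := PySem.List.dedup (pairs.map Prod.fst)
  canales.map (fun c => (c, (pairs.filter (fun p => p.1 == c)).map Prod.snd))

-- ===== PRECONDITION & SPEC =====
-- Pre_ excludes exactly the inputs where some element does not split on ": " into two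
-- pieces: there Python's tuple unpacking raises ValueError in both A and B.
def Pre_TraducirSelecion (lista : List String) : Prop :=
  ∀ s ∈ lista, ((PySem.Str.split? s ": ").getD []).length = 2
instance (lista : List String) : Decidable (Pre_TraducirSelecion lista) := by
  unfold Pre_TraducirSelecion; infer_instance

def pvWitness_TraducirSelecion : List String := ["c1: f1", "c2: f2", "c1: f3"]

def Spec_TraducirSelecion (lista : List String) (out : List (String × List String)) : Prop := out = TraducirSelecion_alt lista
instance (lista : List String) (out : List (String × List String)) : Decidable (Spec_TraducirSelecion lista out) := by unfold Spec_TraducirSelecion; infer_instance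

-- ===== CLAIM (what is proved, stated in full; the proofs are below) =====
def Claim_equal_TraducirSelecion : Prop := ∀ (lista : List String), Dom_TraducirSelecion lista → Pre_TraducirSelecion lista → Spec_TraducirSelecion lista (TraducirSelecion lista)

-- ===== LEMMAS AND PROOFS =====

-- A's loop body, once the element is known to split into two pieces
def pvIns (d : PySem.Dict String (List String)) (p : String × String) :
    PySem.Dict String (List String) :=
  match PySem.Dict.get? d p.1 with
  | some fs => PySem.Dict.insert d p.1 (fs ++ [p.2])
  | none => PySem.Dict.insert d p.1 [p.2]

-- B's grouping, expressed on the parsed pair list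
def pvG (ps : List (String × String)) : List (String × List String) :=
  (PySem.List.dedup (ps.map Prod.fst)).map
    (fun c => (c, (ps.filter (fun p => p.1 == c)).map Prod.snd))

lemma pvGet?_mapkeys (ks : List String) (f : String → List String) (c : String)
    (hn : ks.Nodup) :
    (PySem.Dict.mk (ks.map (fun k => (k, f k)))).get? c
      = if c ∈ ks then some (f c) else none := by
  induction ks with
  | nil => simp [PySem.Dict.get?]
  | cons k ks ih =>
    simp only [List.map_cons, PySem.Dict.get?_mk_cons]
    rcases List.nodup_cons.mp hn with ⟨hk, hks⟩
    by_cases h : k = c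
    · subst h; simp
    · simp only [beq_iff_eq, h, if_false, ih hks, List.mem_cons]
      have : ¬ c = k := fun hc => h hc.symm
      simp [this]

lemma pvDedup_snoc (l : List String) (c : String) :
    PySem.List.dedup (l ++ [c])
      = if c ∈ PySem.List.dedup l then PySem.List.dedup l
        else PySem.List.dedup l ++ [c] := by
  simp only [PySem.List.dedup_eq_ofList, PySem.Set.ofList_eq_foldl, List.foldl_append,
    List.foldl_cons, List.foldl_nil]
  rw [show (List.foldl PySem.Set.add [] l).add c
        = if (List.foldl PySem.Set.add [] l).contains c = true
          then List.foldl PySem.Set.add [] l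
          else List.foldl PySem.Set.add [] l ++ [c] from rfl]
  by_cases h : c ∈ List.foldl PySem.Set.add [] l
  · simp [PySem.Set.contains, h]
  · simp [PySem.Set.contains, h]

lemma pvFilter_nil_of_not_mem (ps : List (String × String)) (c : String)
    (h : c ∉ ps.map Prod.fst) :
    ps.filter (fun p => p.1 == c) = [] := by
  rw [List.filter_eq_nil_iff]
  intro p hp hpc
  exact h (List.mem_map.mpr ⟨p, hp, (beq_iff_eq.mp hpc).symm ▸ rfl⟩)

lemma pvIns_step (ps : List (String × String)) (p : String × String) :
    (pvIns (PySem.Dict.mk (pvG ps)) p).items = pvG (ps ++ [p]) := by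
  obtain ⟨c, f⟩ := p
  have hget := pvGet?_mapkeys (PySem.List.dedup (ps.map Prod.fst))
      (fun k => (ps.filter (fun q => q.1 == k)).map Prod.snd) c
      (PySem.List.nodup_dedup _)
  have hkeys : pvG (ps ++ [(c, f)])
      = (PySem.List.dedup (ps.map Prod.fst ++ [c])).map
          (fun k => (k, ((ps.filter (fun q => q.1 == k)).map Prod.snd)
                        ++ (if c = k then [f] else []))) := by
    simp only [pvG, List.map_append, List.filter_append, List.map_cons, List.map_nil]
    apply List.map_congr_left
    intro k _
    by_cases h : c = k
    · subst h; simp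
    · have hb : (c == k) = false := beq_eq_false_iff_ne.mpr h
      simp [hb, h]
  by_cases hmem : c ∈ PySem.List.dedup (ps.map Prod.fst)
  · -- existing channel: overwrite in place
    have hsome : (PySem.Dict.mk (pvG ps)).get? c
        = some ((ps.filter (fun q => q.1 == c)).map Prod.snd) := by
      rw [show pvG ps = (PySem.List.dedup (ps.map Prod.fst)).map
            (fun k => (k, (ps.filter (fun q => q.1 == k)).map Prod.snd)) from rfl,
          hget, if_pos hmem]
    have hcont : (PySem.Dict.mk (pvG ps)).contains c = true := by
      rcases Bool.eq_false_or_eq_true ((PySem.Dict.mk (pvG ps)).contains c) with h | h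
      · exact h
      · have hnone := (PySem.Dict.get?_eq_none_iff_contains (PySem.Dict.mk (pvG ps)) c).mpr h
        rw [hnone] at hsome; cases hsome
    simp only [pvIns, hsome]
    rw [PySem.Dict.items_insert_of_contains _ _ hcont, hkeys, pvDedup_snoc,
      if_pos hmem]
    rw [show pvG ps = (PySem.List.dedup (ps.map Prod.fst)).map
          (fun k => (k, (ps.filter (fun q => q.1 == k)).map Prod.snd)) from rfl,
        List.map_map]
    apply List.map_congr_left
    intro k _
    by_cases h : k = c
    · subst h; simp
    · have : ¬ c = k := fun hc => h hc.symm
      simp [Function.comp, h, this]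
  · -- new channel: append at the end
    have hnone : (PySem.Dict.mk (pvG ps)).get? c = none := by
      rw [show pvG ps = (PySem.List.dedup (ps.map Prod.fst)).map
            (fun k => (k, (ps.filter (fun q => q.1 == k)).map Prod.snd)) from rfl,
          hget, if_neg hmem]
    have hcont : (PySem.Dict.mk (pvG ps)).contains c = false :=
      (PySem.Dict.get?_eq_none_iff_contains _ _).mp hnone
    simp only [pvIns, hnone]
    rw [PySem.Dict.items_insert_of_not_contains _ _ hcont, hkeys, pvDedup_snoc,
      if_neg hmem, List.map_append]
    have hfc : ps.filter (fun q => q.1 == c) = [] :=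
      pvFilter_nil_of_not_mem ps c
        (fun h => hmem ((PySem.List.mem_dedup _ _).mpr h))
    congr 1
    · rw [show pvG ps = (PySem.List.dedup (ps.map Prod.fst)).map
            (fun k => (k, (ps.filter (fun q => q.1 == k)).map Prod.snd)) from rfl]
      apply List.map_congr_left
      intro k hk
      have : ¬ c = k := fun hc => hmem (hc ▸ hk)
      simp [this]
    · simp [hfc]

lemma pvFoldl_ins_eq (ps : List (String × String)) :
    (ps.foldl pvIns (PySem.Dict.mk [])).items = pvG ps := by
  induction ps using List.reverseRecOn with
  | nil => simp [pvG, PySem.List.dedup_eq_ofList, PySem.Set.ofList_eq_foldl]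
  | append_singleton ps p ih =>
    rw [List.foldl_append, List.foldl_cons, List.foldl_nil]
    have hD : ps.foldl pvIns (PySem.Dict.mk []) = PySem.Dict.mk (pvG ps) := by
      apply PySem.Dict.ext; exact ih
    rw [hD, pvIns_step]

-- ===== VERDICT (by name: the statement is the Claim_ definition above) =====
theorem TraducirSelecion_spec : Claim_equal_TraducirSelecion := by
  intro lista _hdom hpre
  unfold Spec_TraducirSelecion
  show TraducirSelecion lista = TraducirSelecion_alt lista
  unfold TraducirSelecion
  rw [PySem.List.foldl_pyRange_zero_pyGetD lista ""
      (fun d s =>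
        match pvSplit s with
        | [canal, carac] =>
          match PySem.Dict.get? d canal with
          | some fs => PySem.Dict.insert d canal (fs ++ [carac])
          | none => PySem.Dict.insert d canal [carac]
        | _ => d) (PySem.Dict.mk [])]
  rw [PySem.List.foldl_congr_mem lista _ (fun d s => pvIns d (pvParse s)) (PySem.Dict.mk [])
      (by
        intro d s hs
        have h2 := hpre s hs
        rcases hsp : (PySem.Str.split? s ": ").getD [] with _ | ⟨a, _ | ⟨b, _ | ⟨x, xs⟩⟩⟩ <;>
          simp_all [pvParse, pvIns, pvSplit])]
  rw [← List.foldl_map]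
  rw [pvFoldl_ins_eq]
  rfl
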